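-- pv_equiv track=rewrite | github.com/vmware/vmware-openapi-generator | vmsgen.py | find_url
-- ===== SOURCE A (Python) =====
-- def find_url(list_of_links):
--     """
--     There are many apis which get same work done.
--     The idea here is to show the best one.
--     Here is the logic for picking the best one.
--     * if there is only one element in the list, the choice is obvious.
--     * if there are more than one:
--         return for a link which does not contain "~action" in them and which contain "id:{}" in them.
--     """
--     if len(list_of_links) == 1:
--         return list_of_links[0]['href'], list_of_links[0]['method']
--
--     non_action_link = None
--     for link in list_of_links:
--         if '~action=' not in link['href']:
--             if "id:" in link['href']:
--                 return link['href'], link['method']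
--             if non_action_link is None:
--                 non_action_link = link
--     if non_action_link is None:
--         # all links have ~action in them. check if any of them has id: and return it.
--         for link in list_of_links:
--             if "id:" in link['href']:
--                 return link['href'], link['method']
--
--         # all links have ~action in them and none of them have id: (pick any one)
--         return list_of_links[0]['href'], list_of_links[0]['method']
--
--     return non_action_link['href'], non_action_link['method']
-- ===== SOURCE B (Python) =====
-- def find_url(list_of_links):
--     first_nonaction_id = None
--     first_nonaction = None
--     first_action_id = None
--     for link in list_of_links:
--         href = link['href']
--         if '~action=' in href:
--             if first_action_id is None and 'id:' in href:
--                 first_action_id = link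
--         else:
--             if first_nonaction is None:
--                 first_nonaction = link
--             if first_nonaction_id is None and 'id:' in href:
--                 first_nonaction_id = link
--     best = first_nonaction_id
--     if best is None:
--         best = first_nonaction
--     if best is None:
--         best = first_action_id
--     if best is None:
--         best = list_of_links[0]
--     return best['href'], best['method']
-- ===== Notes on version B (the rewrite author's own statement) =====
-- stated objective: simpler
-- what changed: Replaces A's len==1 shortcut, early-return scan with a carried non_action_link and a conditional second pass, by one pass recording the first link of each category (non-action with id:, non-action, action with id:) followed by a flat priority selection.
-- outside the precondition, e.g. on find_url([{'href': 'id:x', 'method': 'GET'}, {}]): A returns ('id:x', 'GET'), B raises KeyError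
import Mathlib
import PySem

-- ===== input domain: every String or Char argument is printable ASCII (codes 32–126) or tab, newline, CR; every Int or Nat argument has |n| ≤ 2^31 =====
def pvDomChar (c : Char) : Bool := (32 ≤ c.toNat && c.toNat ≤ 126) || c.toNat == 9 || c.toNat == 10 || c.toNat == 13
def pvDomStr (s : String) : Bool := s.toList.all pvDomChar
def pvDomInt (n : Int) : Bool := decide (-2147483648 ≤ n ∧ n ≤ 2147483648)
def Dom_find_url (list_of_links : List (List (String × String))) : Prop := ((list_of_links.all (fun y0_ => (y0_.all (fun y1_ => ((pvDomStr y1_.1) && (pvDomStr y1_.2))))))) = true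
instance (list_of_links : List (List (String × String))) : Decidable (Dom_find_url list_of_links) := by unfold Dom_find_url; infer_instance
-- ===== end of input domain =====

-- B replaces A's early-return scan plus conditional second pass by one pass
-- recording category-firsts and a flat priority selection (objective: simpler).

-- ===== PORT A =====
-- link['href'] / link['method']: dict lookup, first match; Pre_ guarantees the key
-- is present, so the default "" is never used on admitted inputs.
def pvHref (link : List (String × String)) : String := (List.lookup "href" link).getD ""
def pvMethod (link : List (String × String)) : String := (List.lookup "method" link).getD ""

-- A's first loop: early return (.inl) or the accumulated non_action_link (.inr)
def findA_loop1 : List (List (String × String)) → Option (List (String × String)) →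
    (String × String) ⊕ Option (List (String × String))
  | [], na => .inr na
  | l :: t, na =>
    if ¬ (PySem.Str.isIn "~action=" (pvHref l) = true) then
      if PySem.Str.isIn "id:" (pvHref l) = true then .inl (pvHref l, pvMethod l)
      else findA_loop1 t (if na.isNone then some l else na)
    else findA_loop1 t na

-- A's second loop: first link whose href contains "id:"
def findA_loop2 : List (List (String × String)) → Option (String × String)
  | [] => none
  | l :: t => if PySem.Str.isIn "id:" (pvHref l) = true then some (pvHref l, pvMethod l)
              else findA_loop2 t

def find_url (list_of_links : List (List (String × String))) : String × String :=
  if list_of_links.length == 1 then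
    (pvHref (list_of_links.headD []), pvMethod (list_of_links.headD []))
  else
    match findA_loop1 list_of_links none with
    | .inl r => r
    | .inr (some na) => (pvHref na, pvMethod na)
    | .inr none =>
      match findA_loop2 list_of_links with
      | some r => r
      | none => (pvHref (list_of_links.headD []), pvMethod (list_of_links.headD []))

-- ===== PORT B =====
-- one step of B's single pass: state = (first_nonaction_id, first_nonaction, first_action_id)
def findB_step (s : Option (List (String × String)) × Option (List (String × String)) ×
    Option (List (String × String))) (link : List (String × String)) :
    Option (List (String × String)) × Option (List (String × String)) ×
    Option (List (String × String)) :=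
  let href := pvHref link
  if PySem.Str.isIn "~action=" href = true then
    if s.2.2.isNone ∧ PySem.Str.isIn "id:" href = true then (s.1, s.2.1, some link) else s
  else
    let fna := if s.2.1.isNone then some link else s.2.1
    let fnaid := if s.1.isNone ∧ PySem.Str.isIn "id:" href = true then some link else s.1
    (fnaid, fna, s.2.2)

def find_url_alt (list_of_links : List (List (String × String))) : String × String :=
  let s := list_of_links.foldl findB_step (none, none, none)
  let best := ((s.1.orElse fun _ => s.2.1).orElse fun _ => s.2.2).getD (list_of_links.headD [])
  (pvHref best, pvMethod best)

-- ===== PRECONDITION & SPEC =====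
-- Pre_ excludes the empty list (A raises IndexError) and lists with a link missing the
-- 'href' or 'method' key (A raises KeyError when it reaches such a link; requiring the
-- keys on links A's early return never reaches is a stated simplification).
def Pre_find_url (list_of_links : List (List (String × String))) : Prop :=
  list_of_links ≠ [] ∧ ∀ link ∈ list_of_links,
    (List.lookup "href" link).isSome = true ∧ (List.lookup "method" link).isSome = true
instance (list_of_links : List (List (String × String))) : Decidable (Pre_find_url list_of_links) := by unfold Pre_find_url; infer_instance
def pvWitness_find_url : (List (List (String × String))) :=
  [[("href", "a/~action=stop"), ("method", "POST")], [("href", "a/id:7"), ("method", "GET")]]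

def Spec_find_url (list_of_links : List (List (String × String))) (out : String × String) : Prop := out = find_url_alt list_of_links
instance (list_of_links : List (List (String × String))) (out : String × String) : Decidable (Spec_find_url list_of_links out) := by unfold Spec_find_url; infer_instance

-- ===== CLAIM (what is proved, stated in full; the proofs are below) =====
def Claim_equal_find_url : Prop := ∀ (list_of_links : List (List (String × String))), Dom_find_url list_of_links → Pre_find_url list_of_links → Spec_find_url list_of_links (find_url list_of_links)

-- ===== LEMMAS AND PROOFS =====

-- category predicates (proof-only helpers)
def pNaid (l : List (String × String)) : Bool :=
  !PySem.Str.isIn "~action=" (pvHref l) && PySem.Str.isIn "id:" (pvHref l)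
def pNa (l : List (String × String)) : Bool := !PySem.Str.isIn "~action=" (pvHref l)
def pAid (l : List (String × String)) : Bool :=
  PySem.Str.isIn "~action=" (pvHref l) && PySem.Str.isIn "id:" (pvHref l)
def pId (l : List (String × String)) : Bool := PySem.Str.isIn "id:" (pvHref l)

theorem loop1_char (t : List (List (String × String)))
    (na : Option (List (String × String))) :
    findA_loop1 t na =
      match t.find? pNaid with
      | some l => .inl (pvHref l, pvMethod l)
      | none => .inr (na.orElse fun _ => t.find? pNa) := by
  induction t generalizing na with
  | nil => cases na <;> simp [findA_loop1]
  | cons l t ih =>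
    by_cases ha : PySem.Str.isIn "~action=" (pvHref l) = true <;>
      by_cases hi : PySem.Str.isIn "id:" (pvHref l) = true <;>
      simp at ha hi <;>
      cases na <;>
      simp [findA_loop1, ha, hi, ih, List.find?, pNaid, pNa, Option.orElse]

theorem loop2_char (t : List (List (String × String))) :
    findA_loop2 t = (t.find? pId).map (fun l => (pvHref l, pvMethod l)) := by
  induction t with
  | nil => simp [findA_loop2]
  | cons l t ih =>
    by_cases hi : PySem.Str.isIn "id:" (pvHref l) = true <;>
      simp at hi <;>
      simp [findA_loop2, hi, List.find?, pId, ih]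

theorem scan_char (t : List (List (String × String)))
    (s : Option (List (String × String)) × Option (List (String × String)) ×
      Option (List (String × String))) :
    t.foldl findB_step s =
      ((s.1.orElse fun _ => t.find? pNaid),
       (s.2.1.orElse fun _ => t.find? pNa),
       (s.2.2.orElse fun _ => t.find? pAid)) := by
  induction t generalizing s with
  | nil => simp
  | cons l t ih =>
    obtain ⟨x, y, z⟩ := s
    by_cases ha : PySem.Str.isIn "~action=" (pvHref l) = true <;>
      by_cases hi : PySem.Str.isIn "id:" (pvHref l) = true <;>
      simp at ha hi <;>
      cases x <;> cases y <;> cases z <;>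
      simp [findB_step, ha, hi, ih, List.find?, pNaid, pNa, pAid, Option.orElse]

-- if no link is non-action, first "id:" link = first action-with-"id:" link
theorem find?_id_of_all_action (t : List (List (String × String)))
    (h : t.find? pNa = none) : t.find? pId = t.find? pAid := by
  induction t with
  | nil => rfl
  | cons l t ih =>
    simp only [List.find?] at h ⊢
    cases hna : pNa l with
    | true => simp [hna] at h
    | false =>
      have ha : PySem.Chars.isIn "~action=".toList (pvHref l).toList = true := by
        simpa [pNa] using hna
      simp at ha
      rw [hna] at h
      by_cases hi : PySem.Str.isIn "id:" (pvHref l) = true <;>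
        simp at hi <;>
        simp [pId, pAid, hi, ha, ih h]

-- B's value written through the find?-characterization
theorem alt_char (links : List (List (String × String))) :
    find_url_alt links =
      (fun best => (pvHref best, pvMethod best))
        ((((links.find? pNaid).orElse fun _ => links.find? pNa).orElse
            fun _ => links.find? pAid).getD (links.headD [])) := by
  simp [find_url_alt, scan_char, Option.orElse]

theorem find_url_eq (links : List (List (String × String))) (hne : links ≠ []) :
    find_url links = find_url_alt links := by
  rw [alt_char]
  unfold find_url
  rw [loop1_char]
  cases hnaid : links.find? pNaid with
  | some l => -- first non-action id: link: both return it, also in the length-1 case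
    have hmem := List.mem_of_find?_eq_some hnaid
    rcases links with _ | ⟨a, t⟩
    · simp at hmem
    · rcases t with _ | ⟨b, t⟩
      · simp only [List.find?] at hnaid
        rcases hp : pNaid a with _ | _
        · rw [hp] at hnaid; simp at hnaid
        · rw [hp] at hnaid
          simp_all
      · simp_all [Option.orElse]
  | none =>
    cases hna : links.find? pNa with
    | some l =>
      rcases links with _ | ⟨a, t⟩
      · exact absurd rfl hne
      · rcases t with _ | ⟨b, t⟩
        · -- single link, non-action, no id (else pNaid would hold)
          simp only [List.find?] at hna hnaid
          rcases hp : pNa a with _ | _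
          · rw [hp] at hna; simp at hna
          · rw [hp] at hna
            rcases hq : pNaid a with _ | _
            · simp only [pNa] at hp
              simp only [pNaid, hp, Bool.true_and] at hq
              simp_all [pvHref]
            · rw [hq] at hnaid; simp at hnaid
        · simp_all [Option.orElse]
    | none =>
      rw [loop2_char, find?_id_of_all_action links hna]
      cases haid : links.find? pAid with
      | some l =>
        rcases links with _ | ⟨a, t⟩
        · exact absurd rfl hne
        · rcases t with _ | ⟨b, t⟩
          · simp only [List.find?] at haid
            rcases hp : pAid a with _ | _
            · rw [hp] at haid; simp at haid
            · rw [hp] at haid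
              simp_all
          · simp_all [Option.orElse]
      | none =>
        rcases links with _ | ⟨a, t⟩
        · exact absurd rfl hne
        · rcases t with _ | ⟨b, t⟩ <;> simp_all [Option.orElse]

-- ===== VERDICT (by name: the statement is the Claim_ definition above) =====
theorem find_url_spec : Claim_equal_find_url := by
  intro links _ hpre
  unfold Spec_find_url
  exact find_url_eq links hpre.1
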